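-- pv_equiv track=rewrite | github.com/sphuro/Risc-5-compiler | Simulator.py | unsigned
-- ===== SOURCE A (Python) =====
-- def to_bin(value, num_bits):
--     # converts decimal value to 2's complent binary representation
--     if value >= 0:
--         value = bin(value)[2:].zfill(num_bits)
--     else:
--         value = bin(value & (2**num_bits - 1))[2:].zfill(num_bits)
--     return (value)
--
-- def unsigned(val):
--     val = to_bin(val, 32)
--     unsigned_val = 0
--     for i in range(32):
--         idx = -(i+1)
--         if val[idx] == '1':
--             unsigned_val += 2**i
--     return unsigned_val
-- ===== SOURCE B (Python) =====
-- def unsigned(val):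
--     return val & 0xFFFFFFFF
-- ===== Notes on version B (the rewrite author's own statement) =====
-- stated objective: simpler
-- what changed: Replaces the binary-string construction (bin/zfill) and the per-bit summing loop with a single bitmask expression val & 0xFFFFFFFF.
import Mathlib
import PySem

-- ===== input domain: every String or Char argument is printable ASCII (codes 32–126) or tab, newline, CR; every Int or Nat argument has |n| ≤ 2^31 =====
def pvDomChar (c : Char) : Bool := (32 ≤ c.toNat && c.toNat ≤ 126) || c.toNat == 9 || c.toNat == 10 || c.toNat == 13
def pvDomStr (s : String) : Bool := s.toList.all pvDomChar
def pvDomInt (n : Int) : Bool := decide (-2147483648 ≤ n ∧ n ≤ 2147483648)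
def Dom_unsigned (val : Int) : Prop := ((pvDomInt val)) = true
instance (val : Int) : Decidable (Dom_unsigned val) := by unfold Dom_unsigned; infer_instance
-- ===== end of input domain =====

-- B replaces A's binary-string construction and per-bit summing loop with one bitmask expression (simpler).

-- ===== PORT A =====
-- Python strings are ported as their List Char views (PySem primitives on List Char are exact).
def to_bin (value : Int) (numBits : Int) : List Char :=
  if value ≥ 0 then
    PySem.Chars.zfill (PySem.List.slice (PySem.Int.toBinChars0b value) (some 2) none) numBits
  else
    PySem.Chars.zfill
      (PySem.List.slice (PySem.Int.toBinChars0b (PySem.Int.band value (2 ^ numBits.toNat - 1))) (some 2) none)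
      numBits

def unsigned (val : Int) : Int :=
  let s := to_bin val 32
  (PySem.List.pyRange 0 32 1).foldl
    (fun acc i => if PySem.List.pyGet? s (-(i + 1)) = some '1' then acc + 2 ^ i.toNat else acc) 0

-- ===== PORT B =====
def unsigned_alt (val : Int) : Int := PySem.Int.band val 4294967295

-- ===== PRECONDITION & SPEC =====
def Spec_unsigned (val : Int) (out : Int) : Prop := out = unsigned_alt val
instance (val : Int) (out : Int) : Decidable (Spec_unsigned val out) := by unfold Spec_unsigned; infer_instance

-- ===== CLAIM (what is proved, stated in full; the proofs are below) =====
def Claim_equal_unsigned : Prop := ∀ (val : Int), Dom_unsigned val → Spec_unsigned val (unsigned val)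

-- ===== LEMMAS AND PROOFS =====

/-- value of the bit character, as A's loop reads it -/
def pvBval (c : Char) : Int := if c = '1' then 1 else 0

/-- left-fold binary value of a character list (MSB first) -/
def pvV (cs : List Char) (a : Int) : Int := cs.foldl (fun a c => 2 * a + pvBval c) a

theorem pvV_shift (cs : List Char) (a : Int) : pvV cs a = a * 2 ^ cs.length + pvV cs 0 := by
  induction cs generalizing a with
  | nil => simp [pvV]
  | cons c cs ih =>
    show pvV cs (2 * a + pvBval c) = a * 2 ^ (cs.length + 1) + pvV cs (2 * 0 + pvBval c)
    rw [ih (2 * a + pvBval c), ih (2 * 0 + pvBval c)]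
    ring

theorem pvV_zeros (k : Nat) (cs : List Char) :
    pvV (List.replicate k '0' ++ cs) 0 = pvV cs 0 := by
  induction k with
  | zero => simp
  | succ k ih =>
    have : pvV (List.replicate (k+1) '0' ++ cs) 0
        = pvV (List.replicate k '0' ++ cs) (2 * 0 + pvBval '0') := by
      simp [pvV, List.replicate_succ]
    rw [this]
    simpa [pvBval] using ih

/-- the binary digit list of a natural number, MSB first -/
def pvBits (n : Nat) : List Char :=
  if n < 2 then [Nat.digitChar n] else pvBits (n / 2) ++ [Nat.digitChar (n % 2)]
decreasing_by exact Nat.div_lt_self (by omega) (by omega)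

theorem pvToDigitsCore_eq (f : Nat) : ∀ (n : Nat) (ds : List Char), n < 2 ^ f →
    Nat.toDigitsCore 2 (f + 1) n ds = pvBits n ++ ds := by
  induction f with
  | zero =>
    intro n ds h
    have hn : n = 0 := by omega
    subst hn
    simp [Nat.toDigitsCore, pvBits]
  | succ f ih =>
    intro n ds h
    show (if n / 2 = 0 then Nat.digitChar (n % 2) :: ds
          else Nat.toDigitsCore 2 (f + 1) (n / 2) (Nat.digitChar (n % 2) :: ds)) = pvBits n ++ ds
    by_cases h2 : n / 2 = 0
    · have hn : n < 2 := by omega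
      have hmod : n % 2 = n := by omega
      rw [if_pos h2, pvBits, if_pos hn, hmod]
      simp
    · have hn : ¬ n < 2 := by omega
      have hdiv : n / 2 < 2 ^ f := by
        have : (2:Nat) ^ (f + 1) = 2 ^ f * 2 := by ring
        omega
      rw [if_neg h2, ih (n / 2) _ hdiv]
      conv_rhs => rw [pvBits, if_neg hn]
      simp

theorem pvToDigits_two (n : Nat) : Nat.toDigits 2 n = pvBits n := by
  have h := pvToDigitsCore_eq n n [] Nat.lt_two_pow_self
  simpa [Nat.toDigits] using h

theorem pvBits_mem (n : Nat) : ∀ c ∈ pvBits n, c = '0' ∨ c = '1' := by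
  induction n using Nat.strong_induction_on with
  | _ n ih =>
    rw [pvBits]
    split
    · rename_i hn
      intro c hc
      interval_cases n <;> simp_all [Nat.digitChar]
    · rename_i hn
      intro c hc
      rcases List.mem_append.mp hc with h | h
      · exact ih (n / 2) (Nat.div_lt_self (by omega) (by omega)) c h
      · have : c = Nat.digitChar (n % 2) := by simpa using h
        subst this
        rcases Nat.mod_two_eq_zero_or_one n with h2 | h2 <;> simp [h2, Nat.digitChar]

theorem pvBits_ne_nil (n : Nat) : pvBits n ≠ [] := by
  rw [pvBits]; split <;> simp

theorem pvV_bits (n : Nat) : pvV (pvBits n) 0 = (n : Int) := by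
  induction n using Nat.strong_induction_on with
  | _ n ih =>
    rw [pvBits]
    split
    · rename_i hn
      interval_cases n <;> simp [pvV, pvBval, Nat.digitChar]
    · rename_i hn
      rw [pvV, List.foldl_append]
      have ihh := ih (n / 2) (Nat.div_lt_self (by omega) (by omega))
      show pvV [Nat.digitChar (n % 2)] (pvV (pvBits (n / 2)) 0) = (n : Int)
      rw [ihh]
      have : pvV [Nat.digitChar (n % 2)] ((n / 2 : Nat) : Int)
          = 2 * ((n / 2 : Nat) : Int) + pvBval (Nat.digitChar (n % 2)) := by
        simp [pvV]
      rw [this]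
      have hd : pvBval (Nat.digitChar (n % 2)) = ((n % 2 : Nat) : Int) := by
        rcases Nat.mod_two_eq_zero_or_one n with h2 | h2 <;> rw [h2] <;> decide
      rw [hd]
      omega

theorem pvZfill32 (cs : List Char) (hne : cs ≠ [])
    (hh : ∀ c ∈ cs, c = '0' ∨ c = '1') :
    PySem.Chars.zfill cs 32 = List.replicate (32 - cs.length) '0' ++ cs := by
  rw [PySem.Chars.zfill.eq_def]
  split
  · rename_i hle
    have : 32 - cs.length = 0 := by
      have : (32:Nat) ≤ cs.length := by exact_mod_cast hle
      omega
    simp [this]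
  · rename_i hlt
    match cs, hne with
    | c :: rest, _ =>
      have hc : c = '0' ∨ c = '1' := hh c (by simp)
      have hns : ¬ (c = '+' ∨ c = '-') := by rcases hc with h | h <;> simp [h]
      simp [hns]

/-- A's loop over range(32) with negative indexing, for a list of any length, equals the
    left-fold binary value of the list. -/
theorem pvLoop_eq (cs : List Char) (a : Int) :
    (PySem.List.pyRange 0 (cs.length : Int) 1).foldl
      (fun acc i => if PySem.List.pyGet? cs (-(i + 1)) = some '1' then acc + 2 ^ i.toNat else acc) a
    = a + pvV cs 0 := by
  induction cs generalizing a with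
  | nil => simp [pvV, PySem.List.pyRange_one_eq_nil]
  | cons c rest ih =>
    have hcast : ((c :: rest).length : Int) = (rest.length : Int) + 1 := by
      push_cast [List.length_cons]; ring
    rw [hcast, PySem.List.pyRange_one_succ_right (by positivity), List.foldl_append]
    have hcongr : (PySem.List.pyRange 0 (rest.length : Int) 1).foldl
        (fun acc i => if PySem.List.pyGet? (c :: rest) (-(i + 1)) = some '1'
                      then acc + 2 ^ i.toNat else acc) a
      = (PySem.List.pyRange 0 (rest.length : Int) 1).foldl
        (fun acc i => if PySem.List.pyGet? rest (-(i + 1)) = some '1'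
                      then acc + 2 ^ i.toNat else acc) a := by
      apply PySem.List.foldl_congr_mem
      intro acc i hi
      rcases PySem.List.mem_pyRange_one.mp hi with ⟨h0, hlt⟩
      have hk : -(i + 1) = -((i.toNat + 1 : Nat) : Int) := by push_cast; omega
      have hkn : i.toNat + 1 ≤ rest.length := by omega
      rw [hk, PySem.List.pyGet?_neg_natCast _ (i.toNat + 1) (by omega) (by simp; omega),
          PySem.List.pyGet?_neg_natCast _ (i.toNat + 1) (by omega) hkn]
      have hidx : (c :: rest).length - (i.toNat + 1) = (rest.length - (i.toNat + 1)) + 1 := by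
        simp [List.length_cons]; omega
      rw [hidx, List.getElem?_cons_succ]
    rw [hcongr, ih a]
    have hlast : PySem.List.pyGet? (c :: rest) (-((rest.length : Int) + 1)) = some c := by
      have hk : -((rest.length : Int) + 1) = -(((rest.length + 1 : Nat)) : Int) := by push_cast; ring
      rw [hk, PySem.List.pyGet?_neg_natCast _ (rest.length + 1) (by omega) (by simp)]
      simp
    have hV : pvV (c :: rest) 0 = pvBval c * 2 ^ rest.length + pvV rest 0 := by
      show pvV rest (2 * 0 + pvBval c) = _
      rw [pvV_shift]
      ring_nf
    simp only [List.foldl_cons, List.foldl_nil]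
    rw [hlast]
    have htn : ((rest.length : Int)).toNat = rest.length := by simp
    by_cases hc : c = '1'
    · rw [if_pos (by rw [hc]), hV, htn]
      simp [pvBval, hc]
      ring
    · rw [if_neg (by simpa using hc), hV]
      simp [pvBval, hc]

/-- the whole of A, applied to the zero-filled binary digits of n < 2^32, returns n -/
theorem pvMain (n : Nat) (h : n < 2 ^ 32) :
    (PySem.List.pyRange 0 32 1).foldl
      (fun acc i => if PySem.List.pyGet? (PySem.Chars.zfill (Nat.toDigits 2 n) 32) (-(i + 1)) = some '1'
                    then acc + 2 ^ i.toNat else acc) 0 = (n : Int) := by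
  have hlen : (Nat.toDigits 2 n).length ≤ 32 := Nat.toDigits_length 2 n 32 (by norm_num) h
  rw [pvToDigits_two] at hlen ⊢
  rw [pvZfill32 (pvBits n) (pvBits_ne_nil n) (pvBits_mem n)]
  set s : List Char := List.replicate (32 - (pvBits n).length) '0' ++ pvBits n with hs
  have hslen : (s.length : Int) = 32 := by
    simp [hs, List.length_append, List.length_replicate]
    omega
  rw [show (32 : Int) = (s.length : Int) from hslen.symm, pvLoop_eq s 0]
  rw [hs, pvV_zeros, pvV_bits]
  ring

theorem pvMaskNat (m : Nat) (h : m < 2 ^ 32) : m &&& 4294967295 = m := by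
  have h1 : (4294967295 : Nat) = 2 ^ 32 - 1 := by norm_num
  rw [h1, Nat.and_two_pow_sub_one_eq_mod, Nat.mod_eq_of_lt h]

-- ===== VERDICT (by name: the statement is the Claim_ definition above) =====
theorem unsigned_spec : Claim_equal_unsigned := by
  intro val hdom
  have hb : -2147483648 ≤ val ∧ val ≤ 2147483648 := by
    simpa [pvDomInt, Dom_unsigned] using hdom
  show unsigned val = unsigned_alt val
  by_cases h0 : val ≥ 0
  · -- nonnegative branch of to_bin
    have hmask : ¬ ((2147483648 : Int) < 0) := by norm_num
    have hbin : PySem.Int.toBinChars0b val = '0' :: 'b' :: Nat.toDigits 2 val.toNat := by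
      rw [PySem.Int.toBinChars0b, if_neg (by omega)]
    have hslice : PySem.List.slice ('0' :: 'b' :: Nat.toDigits 2 val.toNat) (some 2) none
        = Nat.toDigits 2 val.toNat := by
      rw [show (2:Int) = ((2:Nat):Int) from rfl, PySem.List.slice_from_natCast]
      simp
    have hn : val.toNat < 2 ^ 32 := by omega
    have hA : unsigned val = (val.toNat : Int) := by
      simp only [unsigned]
      rw [show to_bin val 32 = PySem.Chars.zfill (Nat.toDigits 2 val.toNat) 32 by
            rw [to_bin, if_pos h0, hbin, hslice]]
      exact pvMain val.toNat hn
    have hB : unsigned_alt val = (val.toNat : Int) := by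
      rw [unsigned_alt, PySem.Int.band, if_pos h0, if_pos (by norm_num : (0:Int) ≤ 4294967295)]
      have : (4294967295 : Int).toNat = 4294967295 := rfl
      rw [this, pvMaskNat val.toNat hn]
    rw [hA, hB]
  · -- negative branch: A masks with 2**32 - 1, which is exactly B's mask
    have hneg : val < 0 := by omega
    have hmasknum : (2 : Int) ^ (32 : Int).toNat - 1 = 4294967295 := by
      rw [show (32 : Int).toNat = 32 from rfl]; norm_num
    set m : Int := PySem.Int.band val 4294967295 with hm
    have hrange : 0 ≤ m ∧ m ≤ 4294967295 := by
      rw [hm, PySem.Int.band, if_neg (by omega), if_pos (by norm_num : (0:Int) ≤ 4294967295)]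
      rw [show (4294967295 : Int).toNat = 4294967295 from rfl]
      refine ⟨Int.natCast_nonneg _, ?_⟩
      have h2 : (4294967295 - (4294967295 &&& (-val - 1).toNat) : Nat) ≤ 4294967295 :=
        Nat.sub_le _ _
      exact_mod_cast h2
    have hmnonneg : 0 ≤ m := hrange.1
    have hmlt : m < 2 ^ 32 := by have := hrange.2; omega
    have hbin : PySem.Int.toBinChars0b m = '0' :: 'b' :: Nat.toDigits 2 m.toNat := by
      rw [PySem.Int.toBinChars0b, if_neg (by omega)]
    have hslice : PySem.List.slice ('0' :: 'b' :: Nat.toDigits 2 m.toNat) (some 2) none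
        = Nat.toDigits 2 m.toNat := by
      rw [show (2:Int) = ((2:Nat):Int) from rfl, PySem.List.slice_from_natCast]
      simp
    have hn : m.toNat < 2 ^ 32 := by omega
    have hA : unsigned val = (m.toNat : Int) := by
      simp only [unsigned]
      rw [show to_bin val 32 = PySem.Chars.zfill (Nat.toDigits 2 m.toNat) 32 by
            rw [to_bin, if_neg h0, hmasknum, ← hm, hbin, hslice]]
      exact pvMain m.toNat hn
    rw [hA, unsigned_alt, ← hm]
    omega
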